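-- pv_equiv track=rewrite | github.com/MartynaBorak/AOC_2021 | Day 14/Solution.py | count_letters
-- ===== SOURCE A (Python) =====
-- from collections import Counter
--
-- def count_letters(pairs):
--     count = Counter()
--     for key in pairs.keys():
--         if not key[0] == key[1]:
--             count.update({key[0]:pairs[key], key[1]:pairs[key]})
--         else:
--             count.update({key[0]:pairs[key]*2})
--     return count
-- ===== SOURCE B (Python) =====
-- def count_letters(pairs):
--     # Staged pipeline: flatten keys into per-character contributions,
--     # dedup characters in first-occurrence order, then sum per character.
--     contribs = [(key[i], val) for key, val in pairs.items() for i in (0, 1)]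
--     chars = list(dict.fromkeys(ch for ch, _ in contribs))
--     return {ch: sum(v for c, v in contribs if c == ch) for ch in chars}
-- ===== Notes on version B (the rewrite author's own statement) =====
-- stated objective: alternative
-- what changed: Replaces A's single pass of incremental Counter updates with a three-stage pipeline: flatten each key into two (character, value) contributions, dedup the characters in first-occurrence order, then compute each character's total by summing its contributions.
import Mathlib
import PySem

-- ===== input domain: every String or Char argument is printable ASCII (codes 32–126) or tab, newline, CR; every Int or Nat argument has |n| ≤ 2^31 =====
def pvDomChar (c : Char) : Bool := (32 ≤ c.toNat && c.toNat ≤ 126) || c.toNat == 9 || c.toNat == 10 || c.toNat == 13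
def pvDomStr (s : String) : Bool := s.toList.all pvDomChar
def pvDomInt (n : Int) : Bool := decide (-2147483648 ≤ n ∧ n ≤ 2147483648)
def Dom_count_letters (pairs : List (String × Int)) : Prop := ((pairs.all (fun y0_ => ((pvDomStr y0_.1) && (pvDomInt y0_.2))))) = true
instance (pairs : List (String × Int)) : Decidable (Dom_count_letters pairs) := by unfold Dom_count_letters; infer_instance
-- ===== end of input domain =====

-- B replaces A's incremental Counter loop with a staged pipeline (flatten
-- contributions, dedup characters, sum per character); objective: alternative.


-- ===== PORT A =====
-- Counter keys are the one-character strings key[0], key[1]; represented as Char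
-- inside the loop and rendered as one-character strings on return (exact).
def count_letters (pairs : List (String × Int)) : List (String × Int) :=
  let d := PySem.Dict.ofList pairs
  let count : PySem.Dict Char Int :=
    d.keys.foldl (fun count key =>
      let v := d.getD key 0                       -- pairs[key]
      let c0 := key.toList[0]?.getD ' '           -- key[0]; default unreachable under Pre_
      let c1 := key.toList[1]?.getD ' '           -- key[1]; default unreachable under Pre_
      if !(c0 == c1) then
        -- count.update({key[0]: v, key[1]: v}): add v to each, in dict-literal order
        (count.modify c0 0 (· + v)).modify c1 0 (· + v)
      else
        -- count.update({key[0]: v*2})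
        count.modify c0 0 (· + v * 2)) PySem.Dict.empty
  count.items.map (fun kv => (String.ofList [kv.1], kv.2))

-- ===== PORT B =====
def count_letters_alt (pairs : List (String × Int)) : List (String × Int) :=
  let d := PySem.Dict.ofList pairs
  -- contribs = [(key[i], val) for key, val in pairs.items() for i in (0, 1)]
  let contribs : List (Char × Int) :=
    d.items.flatMap (fun kv =>
      [(kv.1.toList[0]?.getD ' ', kv.2), (kv.1.toList[1]?.getD ' ', kv.2)])
  -- chars = list(dict.fromkeys(ch for ch, _ in contribs))
  let chars := PySem.List.dedup (contribs.map (·.1))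
  -- {ch: sum(v for c, v in contribs if c == ch) for ch in chars}
  chars.map (fun ch =>
    (String.ofList [ch],
     (contribs.filter (fun p => p.1 == ch)).foldl (fun a p => a + p.2) 0))

-- ===== PRECONDITION & SPEC =====
-- Pre_ excludes exactly the inputs where some key is shorter than 2 characters:
-- there Python's key[1] (or key[0]) raises IndexError in both A and B.
def Pre_count_letters (pairs : List (String × Int)) : Prop :=
  (pairs.all (fun p => 2 ≤ p.1.toList.length)) = true
instance (pairs : List (String × Int)) : Decidable (Pre_count_letters pairs) := by
  unfold Pre_count_letters; infer_instance
def pvWitness_count_letters : (List (String × Int)) := [("ab", 3), ("bb", 2)]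
def Spec_count_letters (pairs : List (String × Int)) (out : List (String × Int)) : Prop := out = count_letters_alt pairs
instance (pairs : List (String × Int)) (out : List (String × Int)) : Decidable (Spec_count_letters pairs out) := by unfold Spec_count_letters; infer_instance

-- ===== CLAIM (what is proved, stated in full; the proofs are below) =====
def Claim_equal_count_letters : Prop := ∀ (pairs : List (String × Int)), Dom_count_letters pairs → Pre_count_letters pairs → Spec_count_letters pairs (count_letters pairs)

-- ===== LEMMAS AND PROOFS =====

-- folding over a flatMap is the nested fold
theorem foldl_flatMap {α β γ : Type} (l : List α) (g : α → List β)
    (f : γ → β → γ) (init : γ) :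
    (l.flatMap g).foldl f init = l.foldl (fun acc x => (g x).foldl f acc) init := by
  induction l generalizing init with
  | nil => rfl
  | cons a t ih => simp [List.flatMap_cons, List.foldl_append, ih]

-- two additive modifies at the same key collapse into one
theorem modify_add_twice (d : PySem.Dict Char Int) (k : Char) (a b : Int) :
    (d.modify k 0 (· + a)).modify k 0 (· + b) = d.modify k 0 (· + (a + b)) := by
  show ((d.insert k (d.getD k 0 + a)).insert k
      ((d.insert k (d.getD k 0 + a)).getD k 0 + b)) = d.insert k (d.getD k 0 + (a + b))
  rw [PySem.Dict.getD_insert_self, PySem.Dict.insert_insert_self, add_assoc]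

-- A's branching loop body is the fold of the two contributions
theorem body_eq (c : PySem.Dict Char Int) (c0 c1 : Char) (v : Int) :
    (if !(c0 == c1) then (c.modify c0 0 (· + v)).modify c1 0 (· + v)
     else c.modify c0 0 (· + v * 2))
    = [(c0, v), (c1, v)].foldl (fun c p => c.modify p.1 0 (· + p.2)) c := by
  have hfold : [(c0, v), (c1, v)].foldl (fun c p => c.modify p.1 0 (· + p.2)) c
      = (c.modify c0 0 (· + v)).modify c1 0 (· + v) := rfl
  rw [hfold]
  by_cases h : c0 = c1
  · subst h
    simp only [beq_self_eq_true, Bool.not_true, Bool.false_eq_true, if_false]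
    rw [modify_add_twice]
    congr 1
    funext x
    ring
  · simp [h]

-- value of an additive modify-fold: initial value plus the sum of matching contributions
theorem getD_foldl_modify_add (l : List (Char × Int)) (d : PySem.Dict Char Int) (c : Char) :
    (l.foldl (fun d p => d.modify p.1 0 (· + p.2)) d).getD c 0
      = d.getD c 0 + ((l.filter (fun p => p.1 == c)).map (·.2)).sum := by
  induction l generalizing d with
  | nil => simp
  | cons a t ih =>
    simp only [List.foldl_cons, ih, List.filter_cons]
    by_cases h : a.1 = c
    · simp [h, PySem.Dict.getD_modify_self, add_assoc, add_comm, add_left_comm]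
    · have : (a.1 == c) = false := by simp [h]
      simp [this, PySem.Dict.getD_modify_of_ne d 0 _ (Ne.symm h)]

-- B's running-sum fold is the sum of the mapped values
theorem foldl_add_snd (l : List (Char × Int)) (a : Int) :
    l.foldl (fun a p => a + p.2) a = a + (l.map (·.2)).sum := by
  induction l generalizing a with
  | nil => simp
  | cons x t ih => simp [ih, add_assoc]

-- ===== VERDICT (by name: the statement is the Claim_ definition above) =====
theorem count_letters_spec : Claim_equal_count_letters := by
  intro pairs _ _
  unfold Spec_count_letters count_letters count_letters_alt
  dsimp only
  set d := PySem.Dict.ofList pairs with hd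
  have hnd : d.keys.Nodup := PySem.Dict.nodup_keys_ofList pairs
  set g : String × Int → List (Char × Int) := fun kv =>
    [(kv.1.toList[0]?.getD ' ', kv.2), (kv.1.toList[1]?.getD ' ', kv.2)] with hg
  set contribs : List (Char × Int) := d.items.flatMap g with hcontribs
  -- Step 1: A's accumulator dict = the modify-fold over the contribution stream
  have hkeys : d.keys = d.items.map (·.1) := rfl
  have hC : d.keys.foldl (fun count key =>
        let v := d.getD key 0
        let c0 := key.toList[0]?.getD ' '
        let c1 := key.toList[1]?.getD ' '
        if !(c0 == c1) then (count.modify c0 0 (· + v)).modify c1 0 (· + v)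
        else count.modify c0 0 (· + v * 2)) (PySem.Dict.empty : PySem.Dict Char Int)
      = contribs.foldl (fun c p => c.modify p.1 0 (· + p.2)) PySem.Dict.empty := by
    rw [hkeys, List.foldl_map, hcontribs,
        foldl_flatMap d.items g (fun c p => c.modify p.1 0 (· + p.2)) PySem.Dict.empty]
    apply PySem.List.foldl_congr_mem
    intro acc kv hkv
    have hv : d.getD kv.1 0 = kv.2 := by
      have : (kv.1, kv.2) ∈ d.items := by simpa using hkv
      exact PySem.Dict.getD_of_mem_items d this hnd 0
    simp only [hv]
    exact body_eq acc _ _ _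
  rw [hC]
  -- Step 2: render the final dict
  set D := contribs.foldl (fun c p => c.modify p.1 0 (· + p.2)) PySem.Dict.empty with hD
  have hDfold : D = contribs.foldl
      (fun c p => c.modify ((fun q : Char × Int => q.1) p) 0
        ((fun (_ : PySem.Dict Char Int) (q : Char × Int) (v : Int) => v + q.2) c p)) PySem.Dict.empty := rfl
  have hDnd : D.keys.Nodup := by
    rw [hDfold]
    exact PySem.Dict.nodup_keys_foldl_modify_key contribs _ 0 _ _ PySem.Dict.nodup_keys_empty
  have hDkeys : D.keys = PySem.List.dedup (contribs.map (·.1)) := by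
    rw [hDfold, PySem.Dict.keys_foldl_modify_key contribs _ 0 _ PySem.Dict.empty,
        PySem.Dict.keys_empty, PySem.Set.update_nil_left, PySem.List.dedup_eq_ofList]
  rw [PySem.Dict.items_eq_map_keys D hDnd 0, hDkeys, List.map_map]
  apply List.map_congr_left
  intro ch _
  have hval : D.getD ch 0 = ((contribs.filter (fun p => p.1 == ch)).map (·.2)).sum := by
    rw [hD, getD_foldl_modify_add, PySem.Dict.getD_empty, zero_add]
  simp only [Function.comp, hval, foldl_add_snd, zero_add]
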